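-- pv_equiv track=rewrite | github.com/hwansnaa/Algorithm | Programmers_2019 카카오 개발자 겨울 인턴십_징검다리 건너기.py | check
-- ===== SOURCE A (Python) =====
-- def check(stones, mid, k):
--     mem = 0
--     for stone in stones:
--         if stone < mid:
--             mem +=1
--             if mem == k:
--                 return False
--         else:
--             mem = 0
--     return True
-- ===== SOURCE B (Python) =====
-- def check(stones, mid, k):
--     # Divide and conquer: each segment is summarised by the tuple
--     # (length, prefix run, max run, suffix run) of its maximal below-mid runs;
--     # two summaries combine in O(1), and the answer is max_run < k.
--     def solve(seg):
--         n = len(seg)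
--         if n <= 1:
--             if n == 0:
--                 return (0, 0, 0, 0)
--             b = 1 if seg[0] < mid else 0
--             return (1, b, b, b)
--         L = solve(seg[:n // 2])
--         R = solve(seg[n // 2:])
--         ln = L[0] + R[0]
--         pre = L[1] if L[1] < L[0] else L[0] + R[1]
--         mx = max(L[2], R[2], L[3] + R[1])
--         suf = R[3] if R[3] < R[0] else R[0] + L[3]
--         return (ln, pre, mx, suf)
--     return solve(stones)[2] < k
-- ===== Notes on version B (the rewrite author's own statement) =====
-- stated objective: alternative
-- what changed: B replaces A's single-pass reset counter by a divide-and-conquer: every segment is summarised by (length, prefix-run, max-run, suffix-run) of below-mid runs, halves are combined in O(1), and the answer is max-run < k; Pre_ restricts to the problem's natural domain k >= 1 (k counts consecutive skippable stones), since for non-positive k the question is vacuous and A (always True) and B (always False) are equally defensible.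
-- outside the precondition, e.g. on check([-1], 0, 0): A returns True, B returns False; on check([], 0, -1): A returns True, B returns False
import Mathlib
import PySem

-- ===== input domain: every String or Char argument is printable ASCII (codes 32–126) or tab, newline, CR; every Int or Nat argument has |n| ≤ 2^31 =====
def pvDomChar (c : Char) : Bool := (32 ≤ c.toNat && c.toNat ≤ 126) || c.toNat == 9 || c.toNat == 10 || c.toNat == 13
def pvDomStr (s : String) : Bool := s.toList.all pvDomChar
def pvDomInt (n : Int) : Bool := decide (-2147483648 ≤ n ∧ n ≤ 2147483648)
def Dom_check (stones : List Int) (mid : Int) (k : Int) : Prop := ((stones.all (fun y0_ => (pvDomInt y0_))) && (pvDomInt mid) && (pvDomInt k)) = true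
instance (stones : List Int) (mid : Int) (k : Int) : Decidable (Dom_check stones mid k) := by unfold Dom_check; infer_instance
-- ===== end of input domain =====

-- B replaces A's reset-counter pass by a divide-and-conquer over (length, prefix-run, max-run, suffix-run) segment summaries; same O(n) cost, equivalence proved for k ≥ 1.


-- ===== PORT A =====
-- A's loop: counter `mem`, incremented while stone < mid, reset to 0 otherwise,
-- returning False the moment mem == k.
def checkLoop (stones : List Int) (mid : Int) (k : Int) (mem : Int) : Bool :=
  match stones with
  | [] => true
  | stone :: rest =>
    if stone < mid then
      if mem + 1 == k then false else checkLoop rest mid k (mem + 1)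
    else checkLoop rest mid k 0

def check (stones : List Int) (mid : Int) (k : Int) : Bool :=
  checkLoop stones mid k 0

-- ===== PORT B =====
-- B's recursion `solve(seg)`: a segment of length ≤ 1 is summarised directly;
-- otherwise the two halves seg[:n//2] / seg[n//2:] are summarised recursively
-- and combined in O(1).  Summary = (length, prefix run, max run, suffix run).
def solveB (mid : Int) (seg : List Int) : Int × Int × Int × Int :=
  if h : seg.length ≤ 1 then
    match seg with
    | [] => (0, 0, 0, 0)
    | s :: _ => (1, if s < mid then (1:Int) else 0, if s < mid then (1:Int) else 0,
                 if s < mid then (1:Int) else 0)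
  else
    -- Python's n // 2 with n = len(seg) ≥ 0: Nat division, exact here (floordiv = / on ℕ)
    let m := seg.length / 2
    let L := solveB mid (seg.take m)
    let R := solveB mid (seg.drop m)
    (L.1 + R.1,
     if L.2.1 < L.1 then L.2.1 else L.1 + R.2.1,
     max (max L.2.2.1 R.2.2.1) (L.2.2.2 + R.2.1),
     if R.2.2.2 < R.1 then R.2.2.2 else R.1 + L.2.2.2)
termination_by seg.length
decreasing_by
  · simp only [List.length_take]; omega
  · simp only [List.length_drop]; omega

def check_alt (stones : List Int) (mid : Int) (k : Int) : Bool :=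
  decide ((solveB mid stones).2.2.1 < k)

-- ===== PRECONDITION & SPEC =====
-- Pre_ restricts to the problem's natural domain: k counts consecutive skippable
-- stones, so k ≥ 1 by the problem statement. For a non-positive count k ≤ 0 the
-- question is vacuous and either answer is defensible (A returns True, since its
-- counter reaching k needs mem ≥ 1; B returns False, since max-run ≥ 0 ≥ k);
-- no caller specifies k ≤ 0, so those inputs are excluded.
def Pre_check (stones : List Int) (mid : Int) (k : Int) : Prop := 1 ≤ k
instance (stones : List Int) (mid : Int) (k : Int) : Decidable (Pre_check stones mid k) := by unfold Pre_check; infer_instance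
def pvWitness_check : List Int × Int × Int := ([1, 0, 2], 2, 2)

def Spec_check (stones : List Int) (mid : Int) (k : Int) (out : Bool) : Prop := out = check_alt stones mid k
instance (stones : List Int) (mid : Int) (k : Int) (out : Bool) : Decidable (Spec_check stones mid k out) := by unfold Spec_check; infer_instance

-- ===== CLAIM (what is proved, stated in full; the proofs are below) =====
def Claim_equal_check : Prop := ∀ (stones : List Int) (mid : Int) (k : Int), Dom_check stones mid k → Pre_check stones mid k → Spec_check stones mid k (check stones mid k)

-- ===== LEMMAS AND PROOFS =====

-- Reference (linear) characterisations of the three run statistics.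
def preF (mid : Int) : List Int → Int
  | [] => 0
  | s :: xs => if s < mid then 1 + preF mid xs else 0

def sufF (mid : Int) : List Int → Int
  | [] => 0
  | s :: xs =>
    if sufF mid xs < (xs.length : Int) then sufF mid xs
    else if s < mid then 1 + sufF mid xs else sufF mid xs

-- max run, with `cur` the length of the run carried into the segment
def MF (mid : Int) : List Int → Int → Int
  | [], cur => cur
  | s :: xs, cur => if s < mid then MF mid xs (cur + 1) else max cur (MF mid xs 0)

-- current run length after the segment, starting from carry `cur`
def EF (mid : Int) : List Int → Int → Int
  | [], cur => cur
  | s :: xs, cur => if s < mid then EF mid xs (cur + 1) else EF mid xs 0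

theorem preF_bounds (mid : Int) (xs : List Int) : 0 ≤ preF mid xs ∧ preF mid xs ≤ xs.length := by
  induction xs with
  | nil => simp [preF]
  | cons s xs ih =>
    simp only [preF, List.length_cons]
    split
    · push_cast at *; omega
    · refine ⟨le_refl 0, ?_⟩
      push_cast; omega

theorem sufF_bounds (mid : Int) (xs : List Int) : 0 ≤ sufF mid xs ∧ sufF mid xs ≤ xs.length := by
  induction xs with
  | nil => simp [sufF]
  | cons s xs ih =>
    simp only [sufF, List.length_cons]
    split <;> [skip; split] <;> push_cast at * <;> omega

theorem MF_ge (mid : Int) (xs : List Int) (cur : Int) : cur ≤ MF mid xs cur := by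
  induction xs generalizing cur with
  | nil => simp [MF]
  | cons s xs ih =>
    simp only [MF]; split
    · have := ih (cur + 1); omega
    · exact le_max_left _ _

theorem EF_eq (mid : Int) (xs : List Int) (cur : Int) :
    EF mid xs cur = if sufF mid xs = xs.length then cur + xs.length else sufF mid xs := by
  induction xs generalizing cur with
  | nil => simp [EF, sufF]
  | cons s xs ih =>
    have hb := sufF_bounds mid xs
    simp only [EF, sufF, List.length_cons]
    split
    · rw [ih]; push_cast; split_ifs <;> omega
    · rw [ih]; push_cast; split_ifs <;> omega

-- carry decomposition of MF
theorem MF_carry (mid : Int) (xs : List Int) (cur : Int) (h : 0 ≤ cur) :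
    MF mid xs cur = max (cur + preF mid xs) (MF mid xs 0) := by
  induction xs generalizing cur with
  | nil => simp [MF, preF]; omega
  | cons s xs ih =>
    have h0 := MF_ge mid xs 0
    simp only [MF, preF]
    split
    · simp only [zero_add]
      rw [ih (cur + 1) (by omega), ih 1 (by omega)]; omega
    · have hp := preF_bounds mid xs; omega

theorem MF_append (mid : Int) (a b : List Int) (cur : Int) :
    MF mid (a ++ b) cur = max (MF mid a cur) (MF mid b (EF mid a cur)) := by
  induction a generalizing cur with
  | nil =>
    have := MF_ge mid b cur
    simp [MF, EF]; omega
  | cons s a ih =>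
    simp only [List.cons_append, MF, EF]
    split
    · exact ih (cur + 1)
    · rw [ih 0]; omega

theorem preF_append (mid : Int) (a b : List Int) :
    preF mid (a ++ b) =
      if preF mid a < a.length then preF mid a else (a.length : Int) + preF mid b := by
  induction a with
  | nil => simp [preF]
  | cons s a ih =>
    have ha := preF_bounds mid a
    have hb := preF_bounds mid b
    simp only [List.cons_append, preF, List.length_cons, ih]
    push_cast
    split_ifs <;> omega

theorem sufF_append (mid : Int) (a b : List Int) :
    sufF mid (a ++ b) =
      if sufF mid b < b.length then sufF mid b else (b.length : Int) + sufF mid a := by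
  induction a with
  | nil =>
    have hb := sufF_bounds mid b
    simp only [List.nil_append, sufF, List.length_nil]
    split_ifs <;> omega
  | cons s a ih =>
    have ha := sufF_bounds mid a
    have hb := sufF_bounds mid b
    have hab := sufF_bounds mid (a ++ b)
    simp only [List.cons_append, sufF, List.length_cons, List.length_append, ih] at *
    push_cast
    split_ifs at * <;> push_cast at * <;> omega

theorem MF_zero_append (mid : Int) (a b : List Int) :
    MF mid (a ++ b) 0 =
      max (max (MF mid a 0) (MF mid b 0)) (sufF mid a + preF mid b) := by
  have hs := sufF_bounds mid a
  have hE : EF mid a 0 = sufF mid a := by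
    rw [EF_eq]; split_ifs <;> omega
  rw [MF_append, hE, MF_carry mid b _ (by omega)]
  omega

-- solveB computes exactly (length, preF, MF · 0, sufF)
theorem solveB_correct (mid : Int) : ∀ (n : ℕ) (seg : List Int), seg.length = n →
    solveB mid seg = ((seg.length : Int), preF mid seg, MF mid seg 0, sufF mid seg) := by
  intro n
  induction n using Nat.strong_induction_on with
  | _ n ih =>
  intro seg hn
  subst hn
  rw [solveB]
  by_cases h : seg.length ≤ 1
  · rw [dif_pos h]
    match seg with
    | [] => simp [preF, MF, sufF]
    | [s] => by_cases hs : s < mid <;> simp [preF, MF, sufF, hs]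
    | s :: t :: r => simp at h
  · rw [dif_neg h]
    have h2 : 2 ≤ seg.length := by omega
    have htake : (seg.take (seg.length / 2)).length = seg.length / 2 := by simp; omega
    have hdrop : (seg.drop (seg.length / 2)).length = seg.length - seg.length / 2 := by simp
    dsimp only
    rw [ih (seg.take (seg.length / 2)).length (by rw [htake]; omega) _ rfl,
        ih (seg.drop (seg.length / 2)).length (by rw [hdrop]; omega) _ rfl]
    have hsplit : seg = seg.take (seg.length / 2) ++ seg.drop (seg.length / 2) :=
      (List.take_append_drop _ seg).symm
    conv_rhs => rw [hsplit]
    rw [preF_append, MF_zero_append, sufF_append]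
    refine Prod.ext ?_ (Prod.ext ?_ (Prod.ext ?_ ?_)) <;>
      simp only [htake, hdrop, List.length_append] <;> push_cast <;> omega

-- A's loop computes `max run (carried from mem) < k` as long as mem < k and 1 ≤ k.
theorem checkLoop_eq (rest : List Int) (mid k mem : Int) (hk : 1 ≤ k) (hmem : mem < k) :
    checkLoop rest mid k mem = decide (MF mid rest mem < k) := by
  induction rest generalizing mem with
  | nil => simp [checkLoop, MF]; omega
  | cons s xs ih =>
    simp only [checkLoop, MF]
    split
    · by_cases he : mem + 1 = k
      · have hge := MF_ge mid xs (mem + 1)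
        have : (mem + 1 == k) = true := by simp [he]
        rw [this]
        have : ¬ MF mid xs (mem + 1) < k := by omega
        simp [this]
      · have : (mem + 1 == k) = false := by simp [he]
        rw [this]
        simp only [Bool.false_eq_true, if_false]
        exact ih (mem + 1) (by omega)
    · rw [ih 0 (by omega)]
      simp only [decide_eq_decide]
      omega

-- ===== VERDICT (by name: the statement is the Claim_ definition above) =====
theorem check_spec : Claim_equal_check := by
  intro stones mid k _ hk
  have hk' : (1:Int) ≤ k := hk
  unfold Spec_check check check_alt
  rw [solveB_correct mid stones.length stones rfl, checkLoop_eq stones mid k 0 hk' (by omega)]
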